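-- pv_equiv track=rewrite | github.com/aolabNeuro/analyze | aopy/preproc/bmi3d.py | decode_event
-- ===== SOURCE A (Python) =====
-- def decode_event(dictionary, value):
--     '''
--     Decode a integer event code into a event name and data
--
--     Args:
--         dictionary (dict): dictionary of (event_name, event_code) event definitions
--         value (int): number to decode
--
--     Returns:
--         tuple: 2-tuple containing (event_name, data) for the given value
--     '''
--
--     # Sort the dictionary in order of value
--     ordered_list = sorted(dictionary.items(), key=lambda x: x[1])
--
--     # Find a matching event (greatest value that is lower than the given value)
--     for i, event in enumerate(ordered_list[1:]):
--         if value < event[1]: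
--             event_name = ordered_list[i][0]
--             event_data = value - ordered_list[i][1]
--             return event_name, event_data
--
--      # Check last value
--     if value == ordered_list[-1][1]:
--         return ordered_list[-1][0], 0
--
--     # Return none if no matching events
--     return None
-- ===== SOURCE B (Python) =====
-- def decode_event(dictionary, value):
--     '''
--     Decode a integer event code into a event name and data
--
--     Args:
--         dictionary (dict): dictionary of (event_name, event_code) event definitions
--         value (int): number to decode
--
--     Returns:
--         tuple: 2-tuple containing (event_name, data) for the given value
--     '''
--     best_name = None
--     best_code = None
--     max_code = None
--     for name, code in dictionary.items():
--         if max_code is None or code > max_code: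
--             max_code = code
--         if code <= value and (best_code is None or code >= best_code):
--             best_name, best_code = name, code
--     if best_code is None or value > max_code:
--         return None
--     return best_name, value - best_code
-- ===== Notes on version B (the rewrite author's own statement) =====
-- stated objective: faster
-- what changed: Replaces A's sort of the whole dictionary followed by a scan of adjacent sorted pairs with a single unsorted pass that tracks the maximum code and the best entry (largest code <= value, last such entry), so no sorted list is ever built.
-- intended difference: On dictionaries with at least 2 entries whose codes are all greater than value, A falls off its loop's missing lower-bound check and returns the smallest-code event with a negative data offset (e.g. ('a', -2)), while B returns None, the intended 'no matching event' result that A itself already returns in the single-entry case. — e.g. on decode_event([("a", 5), ("b", 9)], 3): A returns some ("a", -2), B returns none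
import Mathlib
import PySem

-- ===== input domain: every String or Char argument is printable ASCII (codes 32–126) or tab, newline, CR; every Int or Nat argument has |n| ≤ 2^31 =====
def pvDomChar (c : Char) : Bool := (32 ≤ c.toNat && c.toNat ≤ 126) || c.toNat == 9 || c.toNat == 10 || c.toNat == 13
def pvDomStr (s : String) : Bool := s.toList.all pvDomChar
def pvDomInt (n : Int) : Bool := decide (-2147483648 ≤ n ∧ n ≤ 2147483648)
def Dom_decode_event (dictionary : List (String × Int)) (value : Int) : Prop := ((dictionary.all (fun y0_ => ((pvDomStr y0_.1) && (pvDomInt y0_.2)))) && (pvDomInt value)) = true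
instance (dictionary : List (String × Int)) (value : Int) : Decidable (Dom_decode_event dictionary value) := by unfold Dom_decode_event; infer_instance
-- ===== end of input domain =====

-- B replaces A's sort-then-scan with one unsorted pass (max code + best entry with code ≤ value): O(n) instead of O(n log n), measurably faster.
-- Return-value equivalence only; neither version mutates its arguments.

-- ===== PORT A =====
-- the 'for i, event in enumerate(ordered_list[1:])' loop with its early return
def decodeLoopA (s : List (String × Int)) (value : Int) : List (Int × (String × Int)) → Option (String × Int)
  | [] => none
  | (i, ev) :: rest =>
      if value < ev.2 then
        match PySem.List.pyGet? s i with
        | some prev => some (prev.1, value - prev.2)   -- ordered_list[i]: i is always in range here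
        | none => none                                 -- unreachable
      else decodeLoopA s value rest

def decode_event (dictionary : List (String × Int)) (value : Int) : Option (String × Int) :=
  let ordered := PySem.List.sorted dictionary (fun x => x.2)
  match decodeLoopA ordered value (PySem.List.enumerate (PySem.List.slice ordered (some 1) none)) with
  | some r => some r
  | none =>
      match PySem.List.pyGet? ordered (-1) with      -- ordered_list[-1]: IndexError on empty dict (outside Pre_)
      | some last => if value = last.2 then some (last.1, 0) else none
      | none => none

-- ===== PORT B =====
-- the two in-loop updates of B's single pass, as helper steps
def maxStep (mx : Option Int) (code : Int) : Option Int :=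
  match mx with
  | none => some code
  | some m => if m < code then some code else some m

def bestStep (value : Int) (best : Option (String × Int)) (p : String × Int) : Option (String × Int) :=
  if (decide (p.2 ≤ value) && (match best with | none => true | some b => decide (b.2 ≤ p.2))) then
    some p
  else best

def bstep (value : Int) (st : Option (String × Int) × Option Int) (p : String × Int) : Option (String × Int) × Option Int :=
  (bestStep value st.1 p, maxStep st.2 p.2)

def decode_event_alt (dictionary : List (String × Int)) (value : Int) : Option (String × Int) :=
  let st := dictionary.foldl (bstep value) (none, none)
  match st.1, st.2 with
  | some b, some m => if m < value then none else some (b.1, value - b.2)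
  | _, _ => none

-- ===== PRECONDITION & SPEC =====
-- Pre_ excludes the empty dictionary (A raises IndexError on ordered_list[-1]) and association
-- lists with duplicate keys, which do not correspond to any Python dict input of A.
def Pre_decode_event (dictionary : List (String × Int)) (value : Int) : Prop :=
  dictionary ≠ [] ∧ (dictionary.map Prod.fst).Nodup
instance (dictionary : List (String × Int)) (value : Int) : Decidable (Pre_decode_event dictionary value) := by unfold Pre_decode_event; infer_instance
def pvWitness_decode_event : (List (String × Int)) × Int := ([("a", 0)], 0)

-- On dictionaries with at least 2 entries whose codes are all greater than value, A falls off its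
-- loop's missing lower-bound check and returns the smallest-code event with a negative data offset,
-- while B returns None, the intended 'no matching event' result that A itself already returns in the
-- single-entry case.
def D_decode_event (dictionary : List (String × Int)) (value : Int) : Prop :=
  2 ≤ dictionary.length ∧ ∀ p ∈ dictionary, value < p.2
instance (dictionary : List (String × Int)) (value : Int) : Decidable (D_decode_event dictionary value) := by unfold D_decode_event; infer_instance

def Spec_decode_event (dictionary : List (String × Int)) (value : Int) (out : Option (String × Int)) : Prop := ¬ D_decode_event dictionary value → out = decode_event_alt dictionary value
instance (dictionary : List (String × Int)) (value : Int) (out : Option (String × Int)) : Decidable (Spec_decode_event dictionary value out) := by unfold Spec_decode_event; infer_instance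

def pvDiffWitness_decode_event : (List (String × Int)) × Int := ([("a", 5), ("b", 9)], 3)
def pvDiffWitnessOut_decode_event : (Option (String × Int)) × (Option (String × Int)) := (some ("a", -2), none)

-- ===== CLAIM (what is proved, stated in full; the proofs are below) =====
def Claim_unchanged_decode_event : Prop := ∀ (dictionary : List (String × Int)) (value : Int), Dom_decode_event dictionary value → Pre_decode_event dictionary value → Spec_decode_event dictionary value (decode_event dictionary value)
def Claim_changed_decode_event : Prop := Dom_decode_event (pvDiffWitness_decode_event.1) (pvDiffWitness_decode_event.2) ∧ Pre_decode_event (pvDiffWitness_decode_event.1) (pvDiffWitness_decode_event.2) ∧ D_decode_event (pvDiffWitness_decode_event.1) (pvDiffWitness_decode_event.2) ∧ decode_event (pvDiffWitness_decode_event.1) (pvDiffWitness_decode_event.2) = pvDiffWitnessOut_decode_event.1 ∧ decode_event_alt (pvDiffWitness_decode_event.1) (pvDiffWitness_decode_event.2) = pvDiffWitnessOut_decode_event.2 ∧ pvDiffWitnessOut_decode_event.1 ≠ pvDiffWitnessOut_decode_event.2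
def Claim_exact_decode_event : Prop := ∀ (dictionary : List (String × Int)) (value : Int), Dom_decode_event dictionary value → Pre_decode_event dictionary value → D_decode_event dictionary value → decode_event dictionary value ≠ decode_event_alt dictionary value
-- ===== LEMMAS AND PROOFS =====

-- A's loop, re-expressed as a scan of adjacent pairs of the sorted list
def pairLoop (value : Int) : List (String × Int) → Option (String × Int)
  | a :: b :: t => if value < b.2 then some (a.1, value - a.2) else pairLoop value (b :: t)
  | _ => none

-- B's fold step commutes with swapping two adjacent entries whose codes are strictly ordered
theorem maxStep_swap (x y : Int) (mx : Option Int) :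
    maxStep (maxStep mx x) y = maxStep (maxStep mx y) x := by
  rcases mx with _ | m
  · by_cases h3 : x < y <;> by_cases h4 : y < x <;>
      simp [maxStep, h3, h4] <;> omega
  · by_cases h1 : m < x <;> by_cases h2 : m < y <;> by_cases h3 : x < y <;>
      by_cases h4 : y < x <;> simp [maxStep, h1, h2, h3, h4] <;> omega

theorem bestStep_swap (value : Int) (x y : String × Int) (hxy : x.2 < y.2)
    (best : Option (String × Int)) :
    bestStep value (bestStep value best x) y = bestStep value (bestStep value best y) x := by
  have h1 : x.2 ≤ y.2 := le_of_lt hxy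
  have h2 : ¬ y.2 ≤ x.2 := not_le.mpr hxy
  rcases best with _ | b
  · by_cases hx : x.2 ≤ value <;> by_cases hy : y.2 ≤ value <;>
      simp [bestStep, hx, hy, h1, h2] <;> omega
  · by_cases hx : x.2 ≤ value <;> by_cases hy : y.2 ≤ value <;>
      by_cases hbx : b.2 ≤ x.2 <;> by_cases hby : b.2 ≤ y.2 <;>
      simp [bestStep, hx, hy, h1, h2, hbx, hby] <;> omega

theorem bstep_swap (value : Int) (x y : String × Int) (hxy : x.2 < y.2)
    (st : Option (String × Int) × Option Int) :
    bstep value (bstep value st x) y = bstep value (bstep value st y) x := by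
  simp only [bstep, maxStep_swap, bestStep_swap value x y hxy]

theorem bfold_move_back (value : Int) (x : String × Int) :
    ∀ (s : List (String × Int)), (∀ z ∈ s, x.2 < z.2) →
      ∀ st, List.foldl (bstep value) st (x :: s) = List.foldl (bstep value) st (s ++ [x])
  | [], _, st => rfl
  | y :: t, h, st => by
    have h1 : x.2 < y.2 := h y (by simp)
    have := bfold_move_back value x t (fun z hz => h z (by simp [hz])) (bstep value st y)
    simp only [List.foldl_cons, bstep_swap value x y h1 st] at this ⊢
    simpa using this

theorem bfold_insertBy (value : Int) (x : String × Int) :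
    ∀ (s : List (String × Int)), s.Pairwise (fun a b => a.2 ≤ b.2) → ∀ st,
      List.foldl (bstep value) st (PySem.List.insertBy (fun a b => decide (a.2 < b.2)) x s)
        = bstep value (List.foldl (bstep value) st s) x
  | [], _, st => rfl
  | y :: t, hp, st => by
    rcases List.pairwise_cons.mp hp with ⟨hy, ht⟩
    by_cases hxy : x.2 < y.2
    · have hall : ∀ z ∈ y :: t, x.2 < z.2 := by
        intro z hz
        rcases List.mem_cons.mp hz with rfl | hz
        · exact hxy
        · exact lt_of_lt_of_le hxy (hy z hz)
      have hmv := bfold_move_back value x (y :: t) hall st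
      simp only [PySem.List.insertBy, hxy, decide_true, if_true]
      rw [hmv, List.foldl_append]
      rfl
    · have := bfold_insertBy value x t ht (bstep value st y)
      simp only [PySem.List.insertBy, hxy, decide_false, List.foldl_cons]
      exact this

-- B's fold is insensitive to the stable sort A performs
theorem bfold_sorted (value : Int) (l : List (String × Int)) :
    List.foldl (bstep value) (none, none) (PySem.List.sorted l (fun x => x.2))
      = List.foldl (bstep value) (none, none) l := by
  induction l using List.reverseRecOn with
  | nil => rfl
  | append_singleton l x ih =>
    have hs : PySem.List.sorted (l ++ [x]) (fun p : String × Int => p.2)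
        = PySem.List.insertBy (fun a b : String × Int => decide (a.2 < b.2)) x
            (PySem.List.sorted l (fun p => p.2)) := by
      rw [PySem.List.sorted_eq_foldl_insertBy, PySem.List.sorted_eq_foldl_insertBy,
        List.foldl_append]
      rfl
    rw [hs, bfold_insertBy value x _ (PySem.List.sorted_pairwise l (fun p => p.2)),
      ih, List.foldl_append]
    rfl

-- value of B's fold on a code-sorted list
theorem bfold_char (value : Int) (s : List (String × Int))
    (hp : s.Pairwise (fun a b => a.2 ≤ b.2)) :
    List.foldl (bstep value) (none, none) s
      = ((s.takeWhile (fun p => decide (p.2 ≤ value))).getLast?,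
          s.getLast?.map (fun p => p.2)) := by
  induction s using List.reverseRecOn with
  | nil => rfl
  | append_singleton s x ih =>
    rcases List.pairwise_append.mp hp with ⟨hps, -, hle⟩
    have hles : ∀ z ∈ s, z.2 ≤ x.2 := fun z hz => hle z hz x (by simp)
    rw [List.foldl_append, ih hps]
    simp only [List.foldl_cons, List.foldl_nil, bstep]
    have hmx : maxStep (s.getLast?.map (fun p => p.2)) x.2 = some x.2 := by
      rcases hgl : s.getLast? with _ | g
      · rfl
      · have hg2 : g.2 ≤ x.2 := hles g (List.mem_of_getLast? hgl)
        simp only [Option.map_some, maxStep]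
        split_ifs with h
        · rfl
        · exact congrArg some (by omega)
    by_cases hx : x.2 ≤ value
    · have hallb : ∀ z ∈ s ++ [x], (fun p : String × Int => decide (p.2 ≤ value)) z = true := by
        intro z hz
        rcases List.mem_append.mp hz with hz | hz
        · simpa using le_trans (hles z hz) hx
        · simp at hz; subst hz; simpa using hx
      have halls : ∀ z ∈ s, (fun p : String × Int => decide (p.2 ≤ value)) z = true :=
        fun z hz => hallb z (by simp [hz])
      have htws : s.takeWhile (fun p => decide (p.2 ≤ value)) = s :=
        List.takeWhile_eq_self_iff.mpr halls
      have htw : (s ++ [x]).takeWhile (fun p => decide (p.2 ≤ value)) = s ++ [x] :=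
        List.takeWhile_eq_self_iff.mpr hallb
      have hbest : bestStep value (s.takeWhile (fun p => decide (p.2 ≤ value))).getLast? x
          = some x := by
        rw [htws]
        rcases hgl : s.getLast? with _ | g
        · simp [bestStep, hx]
        · have : g.2 ≤ x.2 := hles g (List.mem_of_getLast? hgl)
          simp [bestStep, hx, this]
      rw [htw, hbest, hmx]
      simp
    · have htw : (s ++ [x]).takeWhile (fun p => decide (p.2 ≤ value))
          = s.takeWhile (fun p => decide (p.2 ≤ value)) := by
        rw [List.takeWhile_append]
        split_ifs with h
        · have hts : s.takeWhile (fun p => decide (p.2 ≤ value)) = s :=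
            (List.takeWhile_prefix _).eq_of_length h
          simp [hx, hts]
        · rfl
      have hbest : bestStep value (s.takeWhile (fun p => decide (p.2 ≤ value))).getLast? x
          = (s.takeWhile (fun p => decide (p.2 ≤ value))).getLast? := by
        simp [bestStep, hx]
      rw [htw, hbest, hmx]
      simp

-- A's enumerate loop over ordered_list[1:] is the adjacent-pair scan
theorem loopA_eq_pairLoop (value : Int) :
    ∀ (rest pre : List (String × Int)) (a : String × Int),
      decodeLoopA (pre ++ a :: rest) value (PySem.List.enumerate rest (pre.length : Int))
        = pairLoop value (a :: rest)
  | [], pre, a => rfl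
  | b :: t, pre, a => by
    rw [PySem.List.enumerate_cons]
    simp only [decodeLoopA, pairLoop]
    by_cases hb : value < b.2
    · rw [if_pos hb, if_pos hb, PySem.List.pyGet?_append_length]
    · rw [if_neg hb, if_neg hb]
      have harr : pre ++ a :: b :: t = (pre ++ [a]) ++ b :: t := by simp
      have hlen : (pre.length : Int) + 1 = ((pre ++ [a]).length : Int) := by
        simp [List.length_append]
      rw [harr, hlen, loopA_eq_pairLoop value t (pre ++ [a]) b]

theorem pairLoop_none (value : Int) :
    ∀ (s : List (String × Int)), (∀ p ∈ s, p.2 ≤ value) → pairLoop value s = none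
  | [], _ => rfl
  | [_], _ => rfl
  | a :: b :: t, h => by
    have hb : ¬ value < b.2 := not_lt.mpr (h b (by simp))
    simp only [pairLoop, if_neg hb]
    exact pairLoop_none value (b :: t) (fun p hp => h p (by simp at hp ⊢; tauto))

theorem pairLoop_split (value : Int) :
    ∀ (P Q : List (String × Int)), P ≠ [] → Q ≠ [] →
      (∀ p ∈ P, p.2 ≤ value) → (∀ q ∈ Q, value < q.2) →
      pairLoop value (P ++ Q) = P.getLast?.map (fun p => (p.1, value - p.2))
  | [], _, hP, _, _, _ => absurd rfl hP
  | [a], q :: Q', _, _, _, hQ => by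
    have : value < q.2 := hQ q (by simp)
    simp [pairLoop, this]
  | a :: b :: P', Q, _, hQne, hP, hQ => by
    have hb : ¬ value < b.2 := not_lt.mpr (hP b (by simp))
    simp only [List.cons_append, pairLoop, if_neg hb]
    rw [← List.cons_append,
      pairLoop_split value (b :: P') Q (by simp) hQne (fun p hp => hP p (by simp at hp ⊢; tauto)) hQ,
      List.getLast?_cons_cons]

-- decode_event as pairLoop on the sorted list followed by the last-element check
theorem decode_event_eq (dictionary : List (String × Int)) (value : Int)
    (a : String × Int) (rest : List (String × Int))
    (hs : PySem.List.sorted dictionary (fun x => x.2) = a :: rest) :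
    decode_event dictionary value
      = match pairLoop value (a :: rest) with
        | some r => some r
        | none =>
            match (a :: rest).getLast? with
            | some last => if value = last.2 then some (last.1, 0) else none
            | none => none := by
  unfold decode_event
  simp only [hs]
  have h0 : PySem.List.slice (a :: rest) (some 1) = rest := PySem.List.slice_from_one (a :: rest)
  rw [h0, PySem.List.pyGet?_neg_one]
  have h2 : decodeLoopA (a :: rest) value (PySem.List.enumerate rest 0)
      = pairLoop value (a :: rest) := by
    simpa using loopA_eq_pairLoop value rest [] a
  rw [h2]

-- inside D_, B's best stays empty
theorem bfold_best_none (value : Int) :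
    ∀ (l : List (String × Int)) (m0 : Option Int), (∀ p ∈ l, value < p.2) →
      (List.foldl (bstep value) (none, m0) l).1 = none
  | [], _, _ => rfl
  | p :: t, m0, h => by
    have hpv : ¬ p.2 ≤ value := by have := h p (by simp); omega
    simp only [List.foldl_cons, bstep, bestStep, hpv, decide_false, Bool.false_and]
    exact bfold_best_none value t _ (fun q hq => h q (by simp [hq]))

theorem dropWhile_head_false {α : Type} (p : α → Bool) (l : List α) (x : α) (xs : List α)
    (h : l.dropWhile p = x :: xs) : p x = false := by
  have hne : l.dropWhile p ≠ [] := by rw [h]; simp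
  have := List.head_dropWhile_not p hne
  revert hne this
  rw [h]
  intro hne this
  simpa using this

-- main agreement lemma outside D_
theorem main_agree (dictionary : List (String × Int)) (value : Int)
    (hne : dictionary ≠ []) (hD : ¬ D_decode_event dictionary value) :
    decode_event dictionary value = decode_event_alt dictionary value := by
  have hsne : PySem.List.sorted dictionary (fun x : String × Int => x.2) ≠ [] := by
    intro h
    rw [PySem.List.sorted_eq_nil_iff] at h
    exact hne h
  rcases hs : PySem.List.sorted dictionary (fun x : String × Int => x.2) with _ | ⟨a, rest⟩
  · exact absurd hs hsne
  have hp : (a :: rest).Pairwise (fun x y : String × Int => x.2 ≤ y.2) := by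
    have := PySem.List.sorted_pairwise dictionary (fun x : String × Int => x.2)
    rwa [hs] at this
  have hmem : ∀ p, p ∈ a :: rest ↔ p ∈ dictionary := by
    intro p
    rw [← hs]
    exact PySem.List.mem_sorted dictionary (fun x : String × Int => x.2) false p
  have hfold : List.foldl (bstep value) (none, none) dictionary
      = (((a :: rest).takeWhile (fun p => decide (p.2 ≤ value))).getLast?,
          (a :: rest).getLast?.map (fun p : String × Int => p.2)) := by
    rw [← bfold_sorted value dictionary, hs, bfold_char value _ hp]
  have hA := decode_event_eq dictionary value a rest hs
  rcases hQ : (a :: rest).dropWhile (fun p => decide (p.2 ≤ value)) with _ | ⟨q0, Q'⟩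
  · -- every code is ≤ value
    have htw : (a :: rest).takeWhile (fun p => decide (p.2 ≤ value)) = a :: rest := by
      have h1 := List.takeWhile_append_dropWhile
        (p := fun p : String × Int => decide (p.2 ≤ value)) (l := a :: rest)
      rw [hQ, List.append_nil] at h1
      exact h1
    have hall : ∀ p ∈ a :: rest, p.2 ≤ value := by
      intro p hmem'
      have : p ∈ (a :: rest).takeWhile (fun p => decide (p.2 ≤ value)) := htw.symm ▸ hmem'
      simpa using List.mem_takeWhile_imp this
    rcases hgl : (a :: rest).getLast? with _ | g
    · simp at hgl
    have hg : g ∈ a :: rest := List.mem_of_getLast? hgl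
    have hgle : g.2 ≤ value := hall g hg
    have hB : decode_event_alt dictionary value
        = if g.2 < value then none else some (g.1, value - g.2) := by
      simp only [decode_event_alt, hfold, htw, hgl, Option.map_some]
    rw [hA, pairLoop_none value _ hall, hgl, hB]
    show (if value = g.2 then some (g.1, 0) else none)
      = if g.2 < value then none else some (g.1, value - g.2)
    split_ifs with h1 h2 <;>
      first
        | rfl
        | (exfalso; omega)
        | (simp only [Option.some.injEq, Prod.mk.injEq]; refine ⟨trivial, by omega⟩)
  · -- some code exceeds value
    have hsplit : (a :: rest).takeWhile (fun p => decide (p.2 ≤ value)) ++ q0 :: Q'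
        = a :: rest := by
      rw [← hQ]
      exact List.takeWhile_append_dropWhile
    have hPle : ∀ p ∈ (a :: rest).takeWhile (fun p => decide (p.2 ≤ value)), p.2 ≤ value := by
      intro p hmem'
      simpa using List.mem_takeWhile_imp hmem'
    have hq0 : value < q0.2 := by
      have := dropWhile_head_false _ _ _ _ hQ
      simp at this
      omega
    have hQgt : ∀ q ∈ q0 :: Q', value < q.2 := by
      have hpq : (q0 :: Q').Pairwise (fun x y : String × Int => x.2 ≤ y.2) :=
        (List.pairwise_append.mp (hsplit.symm ▸ hp)).2.1
      intro q hq
      rcases List.mem_cons.mp hq with rfl | hq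
      · exact hq0
      · have : q0.2 ≤ q.2 := (List.pairwise_cons.mp hpq).1 q hq
        omega
    rcases hPe : (a :: rest).takeWhile (fun p => decide (p.2 ≤ value)) with _ | ⟨p0, P'⟩
    · -- value is below every code: ¬D_ forces a single-entry dictionary
      have hqa : q0 :: Q' = a :: rest := by
        rw [← hsplit, hPe]
        rfl
      have hallgt : ∀ p ∈ dictionary, value < p.2 := by
        intro p hpd
        exact hQgt p (by rw [hqa]; exact (hmem p).mpr hpd)
      have hlen1 : dictionary.length = 1 := by
        have h2 : ¬ 2 ≤ dictionary.length := fun h2 => hD ⟨h2, hallgt⟩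
        have h0 : dictionary.length ≠ 0 := by simpa using hne
        omega
      have hrest : rest = [] := by
        have h3 := PySem.List.length_sorted (xs := dictionary)
          (key := fun x : String × Int => x.2) (rev := false)
        rw [hs] at h3
        simp [hlen1] at h3
        exact h3
      subst hrest
      have ha : value < a.2 := hallgt a ((hmem a).mp (by simp))
      have hB : decode_event_alt dictionary value = none := by
        simp [decode_event_alt, hfold, hPe]
      have hpl1 : pairLoop value [a] = none := rfl
      rw [hA, hB, hpl1]
      show (if value = a.2 then some (a.1, 0) else none) = none
      rw [if_neg (show ¬ value = a.2 by omega)]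
    · -- nonempty prefix of codes ≤ value, nonempty suffix above
      have hpl := pairLoop_split value ((a :: rest).takeWhile (fun p => decide (p.2 ≤ value)))
        (q0 :: Q') (by rw [hPe]; simp) (by simp) hPle hQgt
      rw [hsplit] at hpl
      rcases hgl : ((a :: rest).takeWhile (fun p => decide (p.2 ≤ value))).getLast? with _ | bl
      · rw [hPe] at hgl; simp at hgl
      have hglS : (a :: rest).getLast? = (q0 :: Q').getLast? := by
        rw [← hsplit]
        exact List.getLast?_append_cons _ q0 Q'
      rcases hglQ : (q0 :: Q').getLast? with _ | gq
      · simp at hglQ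
      have hgq : value < gq.2 := hQgt gq (List.mem_of_getLast? hglQ)
      have hB : decode_event_alt dictionary value
          = if gq.2 < value then none else some (bl.1, value - bl.2) := by
        simp only [decode_event_alt, hfold, hgl, hglS, hglQ, Option.map_some]
      rw [hA, hpl, hgl, hB, if_neg (by omega)]
      simp

-- ===== VERDICT (by name: the statement is the Claim_ definition above) =====
theorem decode_event_spec : Claim_unchanged_decode_event := by
  intro dictionary value _ hpre
  unfold Spec_decode_event
  intro hnD
  exact main_agree dictionary value hpre.1 hnD

theorem decode_event_changed : Claim_changed_decode_event := by
  unfold Claim_changed_decode_event; decide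

theorem decode_event_tight : Claim_exact_decode_event := by
  intro dictionary value _ hpre hD
  rcases hD with ⟨h2, hall⟩
  have hsne : 2 ≤ (PySem.List.sorted dictionary (fun x : String × Int => x.2)).length := by
    have := PySem.List.length_sorted (xs := dictionary) (key := fun x : String × Int => x.2)
      (rev := false)
    omega
  rcases hs : PySem.List.sorted dictionary (fun x : String × Int => x.2) with _ | ⟨a, rest⟩
  · rw [hs] at hsne; simp at hsne
  rcases rest with _ | ⟨b, t⟩
  · rw [hs] at hsne; simp at hsne
  have hb : value < b.2 := by
    have hbs : b ∈ PySem.List.sorted dictionary (fun x : String × Int => x.2) := by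
      rw [hs]; simp
    have : b ∈ dictionary :=
      (PySem.List.mem_sorted dictionary (fun x : String × Int => x.2) false b).mp hbs
    exact hall b this
  have hA : decode_event dictionary value = some (a.1, value - a.2) := by
    rw [decode_event_eq dictionary value a (b :: t) hs]
    simp [pairLoop, hb]
  have hB : decode_event_alt dictionary value = none := by
    unfold decode_event_alt
    have := bfold_best_none value dictionary none hall
    rcases hfold : List.foldl (bstep value) (none, none) dictionary with ⟨b?, m?⟩
    rw [hfold] at this
    simp at this
    subst this
    simp
  rw [hA, hB]
  simp
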